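-- pv_equiv track=rewrite | github.com/Odig0/Paises-App-Angular | src/app/pais/prueba2.py | calculate_string_value
-- ===== SOURCE A (Python) =====
-- def calculate_string_value(t):
--     n = len(t)
--     max_value = 0
--
--     for i in range(n):
--         count = 0
--         for j in range(i, n):
--             if t[j] == t[i]:
--                 count += 1
--                 value = count * (j - i + 1)
--                 max_value = max(max_value, value)
--             else:
--                 break
--
--     return max_value
-- ===== SOURCE B (Python) =====
-- def calculate_string_value(t):
--     best = 0
--     cur = 0
--     prev = None
--     for ch in t:
--         cur = cur + 1 if ch == prev else 1
--         prev = ch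
--         best = max(best, cur)
--     return best * best
-- ===== Notes on version B (the rewrite author's own statement) =====
-- stated objective: faster
-- what changed: Replaced the quadratic nested scan (restarting an equal-char run at every index) by one linear pass that tracks the current consecutive-equal run length and squares the maximum at the end.
import Mathlib
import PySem

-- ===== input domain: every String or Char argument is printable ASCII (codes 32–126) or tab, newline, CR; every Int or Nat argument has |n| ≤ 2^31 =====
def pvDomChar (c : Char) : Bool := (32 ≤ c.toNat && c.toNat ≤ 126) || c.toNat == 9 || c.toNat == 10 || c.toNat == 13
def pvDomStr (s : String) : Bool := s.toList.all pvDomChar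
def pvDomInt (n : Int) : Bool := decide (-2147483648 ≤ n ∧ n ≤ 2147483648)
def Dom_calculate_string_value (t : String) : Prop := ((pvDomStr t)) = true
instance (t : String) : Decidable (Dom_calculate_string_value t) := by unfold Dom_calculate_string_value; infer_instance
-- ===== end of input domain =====

-- B replaces A's quadratic nested scan by a single pass tracking the current equal-char
-- run length and squaring the maximum (objective: faster, O(n) vs O(n^2)).

-- ===== PORT A =====
-- inner loop 'for j in range(i, n): if t[j]==t[i] ... else break'; l is the suffix t[j:]
def pvInnerA (l : List Char) (c : Char) (j i count maxv : Int) : Int :=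
  match l with
  | [] => maxv
  | x :: xs =>
      if x == c then
        pvInnerA xs c (j + 1) i (count + 1) (max maxv ((count + 1) * (j - i + 1)))
      else maxv

-- outer loop 'for i in range(n)'; l is the suffix t[i:]
def pvOuterA (l : List Char) (i maxv : Int) : Int :=
  match l with
  | [] => maxv
  | x :: xs => pvOuterA xs (i + 1) (pvInnerA (x :: xs) x i i 0 maxv)

def calculate_string_value (t : String) : Int := pvOuterA t.toList 0 0

-- ===== PORT B =====
-- single pass: cur = length of current run of equal chars, best = max run length
def pvRunB (l : List Char) (prev : Option Char) (cur best : Int) : Int :=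
  match l with
  | [] => best * best
  | x :: xs =>
      let cur' := if some x == prev then cur + 1 else 1
      pvRunB xs (some x) cur' (max best cur')

def calculate_string_value_alt (t : String) : Int := pvRunB t.toList none 0 0

-- ===== PRECONDITION & SPEC =====
def Spec_calculate_string_value (t : String) (out : Int) : Prop := out = calculate_string_value_alt t
instance (t : String) (out : Int) : Decidable (Spec_calculate_string_value t out) := by unfold Spec_calculate_string_value; infer_instance

-- ===== CLAIM (what is proved, stated in full; the proofs are below) =====
def Claim_equal_calculate_string_value : Prop := ∀ (t : String), Dom_calculate_string_value t → Spec_calculate_string_value t (calculate_string_value t)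

-- ===== LEMMAS AND PROOFS =====

-- length of the equal-to-c prefix of l
def pvTW (c : Char) (l : List Char) : Nat := (l.takeWhile (· == c)).length

-- longest consecutive-equal run length in l
def pvMaxRun : List Char → Nat
  | [] => 0
  | x :: xs => max (1 + pvTW x xs) (pvMaxRun xs)

theorem pvMaxRun_drop_le (l : List Char) (k : Nat) : pvMaxRun (l.drop k) ≤ pvMaxRun l := by
  induction l generalizing k with
  | nil => simp
  | cons x xs ih =>
      cases k with
      | zero => simp
      | succ k => simpa [pvMaxRun] using le_trans (ih k) (le_max_right _ _)

theorem pvMaxRun_le (l : List Char) (c : Char) :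
    pvMaxRun l ≤ max (pvTW c l + 1) (pvMaxRun (l.drop (pvTW c l))) := by
  induction l with
  | nil => simp [pvMaxRun]
  | cons x xs ih =>
      by_cases h : x = c
      · subst h
        have htw : pvTW x (x :: xs) = pvTW x xs + 1 := by simp [pvTW]
        rw [htw]
        have hd : (x :: xs).drop (pvTW x xs + 1) = xs.drop (pvTW x xs) := rfl
        rw [hd]
        have h1 : pvMaxRun (x :: xs) = max (1 + pvTW x xs) (pvMaxRun xs) := rfl
        rw [h1]
        have := ih
        omega
      · have hb : (x == c) = false := by simpa using h
        have htw : pvTW c (x :: xs) = 0 := by simp [pvTW, List.takeWhile, hb]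
        simp [htw]

theorem pvInnerA_eq (l : List Char) (c : Char) (i count maxv : Int)
    (h0 : 0 ≤ count) (hm : count * count ≤ maxv) :
    pvInnerA l c (i + count) i count maxv
      = max maxv ((count + (pvTW c l : Int)) * (count + (pvTW c l : Int))) := by
  induction l generalizing count maxv with
  | nil =>
      simp [pvInnerA, pvTW]
      generalize count * count = p at hm ⊢
      omega
  | cons x xs ih =>
      by_cases h : x = c
      · subst h
        have htw : (pvTW x (x :: xs) : Int) = (pvTW x xs : Int) + 1 := by
          simp [pvTW]
        have step : pvInnerA (x :: xs) x (i + count) i count maxv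
            = pvInnerA xs x (i + count + 1) i (count + 1)
                (max maxv ((count + 1) * (count + 1))) := by
          simp [pvInnerA]
        have harg : i + count + 1 = i + (count + 1) := by ring
        rw [step, harg, ih (count + 1) _ (by omega) (le_max_right _ _)]
        have ha : 0 ≤ (pvTW x xs : Int) := by positivity
        have hsq : (count + 1) * (count + 1)
            ≤ (count + 1 + (pvTW x xs : Int)) * (count + 1 + (pvTW x xs : Int)) := by nlinarith
        rw [htw]
        have he : count + ((pvTW x xs : Int) + 1) = count + 1 + (pvTW x xs : Int) := by ring
        rw [he]
        generalize hq : (count + 1 + (pvTW x xs : Int)) * (count + 1 + (pvTW x xs : Int)) = q at hsq ⊢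
        generalize hp : (count + 1) * (count + 1) = p at hsq ⊢
        omega
      · have hb : (x == c) = false := by simpa using h
        have htw : (pvTW c (x :: xs) : Int) = 0 := by simp [pvTW, List.takeWhile, hb]
        rw [htw]
        simp [pvInnerA, hb]
        generalize hp : count * count = p at hm ⊢
        omega

theorem pvOuterA_eq (l : List Char) (i maxv : Int) (h0 : 0 ≤ maxv) :
    pvOuterA l i maxv = max maxv ((pvMaxRun l : Int) * (pvMaxRun l : Int)) := by
  induction l generalizing i maxv with
  | nil => simp [pvOuterA, pvMaxRun]; omega
  | cons x xs ih =>
      have step : pvInnerA (x :: xs) x i i 0 maxv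
          = max maxv ((1 + (pvTW x xs : Int)) * (1 + (pvTW x xs : Int))) := by
        have h1 : pvInnerA (x :: xs) x i i 0 maxv
            = pvInnerA xs x (i + 1) i 1 (max maxv 1) := by
          simp [pvInnerA]
        have h2 := pvInnerA_eq xs x i 1 (max maxv 1) (by omega) (by omega)
        rw [h1, h2]
        have ha : 0 ≤ (pvTW x xs : Int) := by positivity
        have hsq : (1 : Int) ≤ (1 + (pvTW x xs : Int)) * (1 + (pvTW x xs : Int)) := by nlinarith
        generalize hq : (1 + (pvTW x xs : Int)) * (1 + (pvTW x xs : Int)) = q at hsq ⊢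
        omega
      have hr : pvOuterA (x :: xs) i maxv = pvOuterA xs (i + 1) (pvInnerA (x :: xs) x i i 0 maxv) := rfl
      rw [hr, step, ih (i + 1) _ (by omega)]
      have hmr : (pvMaxRun (x :: xs) : Int) = max (1 + (pvTW x xs : Int)) ((pvMaxRun xs) : Int) := by
        simp [pvMaxRun]
      rw [hmr]
      have ha : 0 ≤ (pvTW x xs : Int) := by positivity
      have hb : 0 ≤ ((pvMaxRun xs) : Int) := by positivity
      rcases le_total (1 + (pvTW x xs : Int)) ((pvMaxRun xs) : Int) with hle | hle
      · have hsq : (1 + (pvTW x xs : Int)) * (1 + (pvTW x xs : Int))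
            ≤ ((pvMaxRun xs) : Int) * ((pvMaxRun xs) : Int) := by nlinarith
        rw [max_eq_right hle]
        generalize hp : (1 + (pvTW x xs : Int)) * (1 + (pvTW x xs : Int)) = p at hsq ⊢
        generalize hq : ((pvMaxRun xs) : Int) * ((pvMaxRun xs) : Int) = q at hsq ⊢
        omega
      · have hsq : ((pvMaxRun xs) : Int) * ((pvMaxRun xs) : Int)
            ≤ (1 + (pvTW x xs : Int)) * (1 + (pvTW x xs : Int)) := by nlinarith
        rw [max_eq_left hle]
        generalize hp : (1 + (pvTW x xs : Int)) * (1 + (pvTW x xs : Int)) = p at hsq ⊢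
        generalize hq : ((pvMaxRun xs) : Int) * ((pvMaxRun xs) : Int) = q at hsq ⊢
        omega

theorem pvRunB_eq (l : List Char) (c : Char) (cur best : Int)
    (h1 : 1 ≤ cur) (h2 : cur ≤ best) :
    pvRunB l (some c) cur best
      = (max best (max (cur + (pvTW c l : Int)) ((pvMaxRun (l.drop (pvTW c l)) : Int))))
        * (max best (max (cur + (pvTW c l : Int)) ((pvMaxRun (l.drop (pvTW c l)) : Int)))) := by
  induction l generalizing c cur best with
  | nil =>
      simp [pvRunB, pvTW, pvMaxRun]
      congr 1 <;> omega
  | cons x xs ih =>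
      by_cases h : x = c
      · subst h
        have htw : pvTW x (x :: xs) = pvTW x xs + 1 := by simp [pvTW]
        have hd : (x :: xs).drop (pvTW x xs + 1) = xs.drop (pvTW x xs) := rfl
        rw [htw, hd]
        have step : pvRunB (x :: xs) (some x) cur best
            = pvRunB xs (some x) (cur + 1) (max best (cur + 1)) := by
          simp [pvRunB]
        rw [step, ih x (cur + 1) _ (by omega) (le_max_right _ _)]
        have ha : 0 ≤ (pvTW x xs : Int) := by positivity
        congr 1 <;> push_cast <;> omega
      · have hb : (x == c) = false := by simpa using h
        have htwn : pvTW c (x :: xs) = 0 := by simp [pvTW, List.takeWhile, hb]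
        have step : pvRunB (x :: xs) (some c) cur best
            = pvRunB xs (some x) 1 (max best 1) := by
          simp [pvRunB, hb]
        rw [step, ih x 1 _ (by omega) (le_max_right _ _), htwn]
        have hK1 := pvMaxRun_le xs x
        have hK2 := pvMaxRun_drop_le xs (pvTW x xs)
        have hmr : pvMaxRun (x :: xs) = max (1 + pvTW x xs) (pvMaxRun xs) := rfl
        rw [List.drop_zero, hmr]
        congr 1 <;> push_cast <;> omega

theorem pvPorts_eq (t : String) : calculate_string_value t = calculate_string_value_alt t := by
  unfold calculate_string_value calculate_string_value_alt
  cases hl : t.toList with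
  | nil => simp [pvOuterA, pvRunB]
  | cons x xs =>
      have hA := pvOuterA_eq (x :: xs) 0 0 (by omega)
      have hstep : pvRunB (x :: xs) none 0 0 = pvRunB xs (some x) 1 1 := by
        simp [pvRunB]
      have hB := pvRunB_eq xs x 1 1 (by omega) (by omega)
      rw [hA, hstep, hB]
      have hK1 := pvMaxRun_le xs x
      have hK2 := pvMaxRun_drop_le xs (pvTW x xs)
      have hmr : pvMaxRun (x :: xs) = max (1 + pvTW x xs) (pvMaxRun xs) := rfl
      have hM2 : max (1 : Int)
            (max (1 + (pvTW x xs : Int)) ((pvMaxRun (xs.drop (pvTW x xs)) : Int)))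
          = ((pvMaxRun (x :: xs) : Nat) : Int) := by
        rw [hmr]; push_cast; omega
      rw [hM2]
      have h0 : 0 ≤ ((pvMaxRun (x :: xs) : Nat) : Int) * ((pvMaxRun (x :: xs) : Nat) : Int) := by
        positivity
      exact max_eq_right h0

-- ===== VERDICT (by name: the statement is the Claim_ definition above) =====
theorem calculate_string_value_spec : Claim_equal_calculate_string_value := by
  intro t _
  unfold Spec_calculate_string_value
  exact pvPorts_eq t
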